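-- pv_equiv track=rewrite | github.com/MurtyShikhar/Pushdown-Layers | data_utils/dyck_helpers.py | get_vocab_of_bracket_types
-- ===== SOURCE A (Python) =====
-- import string
--
-- def get_identifier_iterator():
--     """Returns an iterator to provide unique ids to bracket types."""
--     ids = iter(list(string.ascii_lowercase))
--     k = 1
--     while True:
--         try:
--             str_id = next(ids)
--         except StopIteration:
--             ids = iter(list(string.ascii_lowercase))
--             k += 1
--             str_id = next(ids)
--         yield str_id * k
--
-- def get_vocab_of_bracket_types(bracket_types):
--     """Returns the vocabulary corresponding to the number of brackets.
--
--     There are bracket_types open brackets, bracket_types close brackets,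
--     START, and END.
--     Arguments:
--       bracket_types: int (k in Dyck-(k,m))
--     Returns:
--       Dictionary mapping symbol string  s to int ids.
--     """
--     id_iterator = get_identifier_iterator()
--     ids = [next(id_iterator) for x in range(bracket_types)]
--     vocab = {
--         x: c
--         for c, x in enumerate(
--             ["(" + id_str for id_str in ids]
--             + [id_str + ")" for id_str in ids]
--             + ["START", "END"]
--         )
--     }
--     return vocab, ids
-- ===== SOURCE B (Python) =====
-- import string
--
-- def get_vocab_of_bracket_types(bracket_types):
--     """Closed-form identifiers (no stateful generator) + explicit counter vocab build."""
--     ids = []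
--     for i in range(bracket_types):
--         ids.append(string.ascii_lowercase[i % 26] * (i // 26 + 1))
--     vocab = {}
--     c = 0
--     for id_str in ids:
--         vocab["(" + id_str] = c
--         c += 1
--     for id_str in ids:
--         vocab[id_str + ")"] = c
--         c += 1
--     vocab["START"] = c
--     vocab["END"] = c + 1
--     return vocab, ids
-- ===== Notes on version B (the rewrite author's own statement) =====
-- stated objective: simpler
-- what changed: Replaces the stateful resetting generator with closed-form index arithmetic (ascii_lowercase[i%26]*(i//26+1)) and builds the vocab with an explicit running counter over opens, closes, START, END instead of a dict comprehension over enumerate of a concatenated list.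
import Mathlib
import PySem

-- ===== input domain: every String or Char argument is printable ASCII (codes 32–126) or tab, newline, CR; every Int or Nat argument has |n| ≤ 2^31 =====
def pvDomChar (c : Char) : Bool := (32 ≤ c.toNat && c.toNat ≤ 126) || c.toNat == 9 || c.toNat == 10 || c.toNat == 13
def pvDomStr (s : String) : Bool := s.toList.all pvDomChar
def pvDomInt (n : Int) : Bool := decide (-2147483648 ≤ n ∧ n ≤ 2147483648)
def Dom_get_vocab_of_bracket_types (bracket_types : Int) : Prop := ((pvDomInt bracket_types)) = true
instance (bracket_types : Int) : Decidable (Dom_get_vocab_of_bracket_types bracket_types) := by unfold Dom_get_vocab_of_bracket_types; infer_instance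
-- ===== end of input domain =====

-- B replaces the stateful resetting identifier generator by closed-form index
-- arithmetic and builds the vocab with an explicit running counter; same values, not faster.

-- ===== PORT A =====
-- string.ascii_lowercase
def pvAlphabet : List Char := "abcdefghijklmnopqrstuvwxyz".toList

-- one call to next(id_iterator): state = (remaining letters of the current pass, k)
def pvGenStep (st : List Char × Nat) : String × (List Char × Nat) :=
  match st with
  | ([], k) =>
      -- StopIteration: reset the letter iterator, k += 1, take the first letter
      -- (pvAlphabet is nonempty, so next() on the fresh iterator is its head)
      (String.ofList (List.replicate (k + 1) (pvAlphabet.headD 'a')), (pvAlphabet.tail, k + 1))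
  | (c :: rest, k) => (String.ofList (List.replicate k c), (rest, k))

-- [next(id_iterator) for x in range(bracket_types)]
def pvGenIds : List Int → (List Char × Nat) → List String
  | [], _ => []
  | _ :: xs, st =>
      let (s, st') := pvGenStep st
      s :: pvGenIds xs st'

def get_vocab_of_bracket_types (bracket_types : Int) : (List (String × Int)) × List String :=
  let ids := pvGenIds (PySem.List.pyRange 0 bracket_types 1) (pvAlphabet, 1)
  let entries := ids.map (fun s => "(" ++ s) ++ ids.map (fun s => s ++ ")") ++ ["START", "END"]
  let vocab := (PySem.List.enumerate entries 0).foldl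
      (fun (d : PySem.Dict String Int) p => d.insert p.2 p.1) PySem.Dict.empty
  (vocab.items, ids)

-- ===== PORT B =====
-- string.ascii_lowercase[i % 26] * (i // 26 + 1); i ranges over range(bracket_types),
-- so i is nonnegative and Nat division/mod are exact here
def pvClosedId (i : Nat) : String :=
  String.ofList (List.replicate (i / 26 + 1) (pvAlphabet.getD (i % 26) 'a'))

def get_vocab_of_bracket_types_alt (bracket_types : Int) : (List (String × Int)) × List String :=
  let ids := (List.range bracket_types.toNat).map pvClosedId
  let st1 := ids.foldl
      (fun (st : PySem.Dict String Int × Int) s => (st.1.insert ("(" ++ s) st.2, st.2 + 1))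
      (PySem.Dict.empty, 0)
  let st2 := ids.foldl
      (fun (st : PySem.Dict String Int × Int) s => (st.1.insert (s ++ ")") st.2, st.2 + 1))
      st1
  let vocab := (st2.1.insert "START" st2.2).insert "END" (st2.2 + 1)
  (vocab.items, ids)

-- ===== PRECONDITION & SPEC =====
def Spec_get_vocab_of_bracket_types (bracket_types : Int) (out : (List (String × Int)) × List String) : Prop := out = get_vocab_of_bracket_types_alt bracket_types
instance (bracket_types : Int) (out : (List (String × Int)) × List String) : Decidable (Spec_get_vocab_of_bracket_types bracket_types out) := by unfold Spec_get_vocab_of_bracket_types; infer_instance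

-- ===== CLAIM (what is proved, stated in full; the proofs are below) =====
def Claim_equal_get_vocab_of_bracket_types : Prop := ∀ (bracket_types : Int), Dom_get_vocab_of_bracket_types bracket_types → Spec_get_vocab_of_bracket_types bracket_types (get_vocab_of_bracket_types bracket_types)

-- ===== LEMMAS AND PROOFS =====

-- generator state before producing identifier number i (0-based)
def pvStBefore (i : Nat) : List Char × Nat :=
  if i = 0 then (pvAlphabet, 1) else (pvAlphabet.drop ((i - 1) % 26 + 1), (i - 1) / 26 + 1)

lemma pvGenStep_at (i : Nat) :
    pvGenStep (pvStBefore i) = (pvClosedId i, pvStBefore (i + 1)) := by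
  rcases Nat.eq_zero_or_pos i with h0 | hpos
  · subst h0; decide
  · have hi : i ≠ 0 := Nat.pos_iff_ne_zero.mp hpos
    rcases Nat.lt_or_ge ((i - 1) % 26 + 1) 26 with hlt | hge
    · -- the current pass still has a letter left
      have e1 : pvStBefore i
          = (pvAlphabet[(i - 1) % 26 + 1] :: pvAlphabet.drop ((i - 1) % 26 + 1 + 1),
             (i - 1) / 26 + 1) := by
        unfold pvStBefore
        rw [if_neg hi, List.drop_eq_getElem_cons (by rw [show pvAlphabet.length = 26 from by decide]; omega)]
        rfl
      have hget : pvAlphabet.getD (i % 26) 'a' = pvAlphabet[(i - 1) % 26 + 1] := by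
        rw [show i % 26 = (i - 1) % 26 + 1 by omega]
        exact List.getD_eq_getElem _ _ (by rw [show pvAlphabet.length = 26 from by decide]; omega)
      rw [e1]
      show (String.ofList (List.replicate ((i - 1) / 26 + 1) _), _) = _
      unfold pvClosedId pvStBefore
      rw [if_neg (show i + 1 ≠ 0 by omega), hget, Nat.add_sub_cancel,
        show i % 26 = (i - 1) % 26 + 1 by omega, show i / 26 = (i - 1) / 26 by omega]
    · -- wrap-around: StopIteration, reset, k += 1
      have e1 : pvStBefore i = ([], (i - 1) / 26 + 1) := by
        unfold pvStBefore
        rw [if_neg hi, show (i - 1) % 26 + 1 = 26 by omega,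
          show List.drop 26 pvAlphabet = [] from by decide]
      rw [e1]
      show (String.ofList (List.replicate ((i - 1) / 26 + 1 + 1) (pvAlphabet.headD 'a')),
            (pvAlphabet.tail, (i - 1) / 26 + 1 + 1)) = _
      unfold pvClosedId pvStBefore
      rw [if_neg (show i + 1 ≠ 0 by omega), Nat.add_sub_cancel,
        show i % 26 = 0 by omega, show i / 26 = (i - 1) / 26 + 1 by omega,
        show pvAlphabet.headD 'a' = pvAlphabet.getD 0 'a' by decide,
        show pvAlphabet.drop (0 + 1) = pvAlphabet.tail by decide]

lemma pvGenIds_eq (l : List Int) : ∀ i : Nat,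
    pvGenIds l (pvStBefore i) = (List.range' i l.length).map pvClosedId := by
  induction l with
  | nil => intro i; simp [pvGenIds]
  | cons x xs ih =>
      intro i
      simp only [pvGenIds, pvGenStep_at i, List.length_cons, List.range'_succ, List.map_cons]
      exact congrArg _ (ih (i + 1))

lemma pv_fold_counter (g : String → String) :
    ∀ (xs : List String) (d : PySem.Dict String Int) (c : Int),
    xs.foldl (fun (st : PySem.Dict String Int × Int) s => (st.1.insert (g s) st.2, st.2 + 1)) (d, c)
      = ((PySem.List.enumerate (xs.map g) c).foldl
          (fun (d : PySem.Dict String Int) p => d.insert p.2 p.1) d, c + xs.length) := by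
  intro xs
  induction xs with
  | nil => intro d c; simp [PySem.List.enumerate_nil]
  | cons x xs ih =>
      intro d c
      simp only [List.map_cons, PySem.List.enumerate_cons, List.foldl_cons, ih, List.length_cons]
      congr 1
      push_cast; ring

-- ===== VERDICT (by name: the statement is the Claim_ definition above) =====
theorem get_vocab_of_bracket_types_spec : Claim_equal_get_vocab_of_bracket_types := by
  intro bt _
  show get_vocab_of_bracket_types bt = get_vocab_of_bracket_types_alt bt
  have hids : pvGenIds (PySem.List.pyRange 0 bt 1) (pvAlphabet, 1)
      = (List.range bt.toNat).map pvClosedId := by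
    rw [show (pvAlphabet, (1 : Nat)) = pvStBefore 0 from by simp [pvStBefore], pvGenIds_eq,
      PySem.List.length_pyRange_one, List.range_eq_range']
    norm_num
  simp only [get_vocab_of_bracket_types, get_vocab_of_bracket_types_alt, hids]
  generalize (List.range bt.toNat).map pvClosedId = ids
  rw [pv_fold_counter (fun s => "(" ++ s) ids PySem.Dict.empty 0,
    pv_fold_counter (fun s => s ++ ")") ids _ _]
  simp [PySem.List.enumerate_append, PySem.List.enumerate_cons, List.foldl_append]
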